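-- pv_equiv track=rewrite | github.com/ChinoCribioli/MatasanoChallenge | Set1.py | guess_xor_key_by_space
-- ===== SOURCE A (Python) =====
-- def int_to_bits(n, size = 8): # the size parameter is to fill with leading zeroes if necessary
-- 	bits = []
-- 	while n > 0 :
-- 		bits.append(1 if n % 2 else 0)
-- 		n //= 2
-- 	while len(bits) < size :
-- 		bits.append(0)
-- 	return bits[::-1] # this is to reverse the string
--
-- def bits_to_int(bits):
-- 	integer = 0
-- 	for c in bits:
-- 		integer *= 2
-- 		integer += c
-- 	return integer
--
-- def apply_repeatedXor(bits, key): # key must be an array of bits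
-- 	response = [0 for _ in range(len(bits))]
-- 	keyLength = len(key)
-- 	for i in range(len(bits)):
-- 		response[i] = bits[i] ^ key[i%keyLength]
-- 	return response
--
-- def guess_xor_key_by_space(message):
-- 	# This technique tries to find the key of a message by assuming that the most common character in a message is a space
-- 	counter = [0 for i in range(256)]
-- 	for i in range(len(message)//8):
-- 		counter[bits_to_int(message[8*i:8*(i+1)])] += 1
-- 	moreCommonChar = -1
-- 	appearances = -1
-- 	for i in range(256):
-- 		if appearances < counter[i]:
-- 			appearances = counter[i]
-- 			moreCommonChar = i
-- 	key = int_to_bits(moreCommonChar ^ ord(' '))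
-- 	return (key,apply_repeatedXor(message,key))
-- ===== SOURCE B (Python) =====
-- def int_to_bits(n, size=8):
--     bits = []
--     while n > 0:
--         bits.append(1 if n % 2 else 0)
--         n //= 2
--     while len(bits) < size:
--         bits.append(0)
--     return bits[::-1]
--
-- def bits_to_int(bits):
--     integer = 0
--     for c in bits:
--         integer *= 2
--         integer += c
--     return integer
--
-- def guess_xor_key_by_space(message):
--     # Sort the block values and find the smallest most-frequent one in a single run-length scan.
--     vals = sorted(bits_to_int(message[8 * i:8 * (i + 1)]) for i in range(len(message) // 8))
--     mode = 0
--     best = 0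
--     run_val = None
--     run_len = 0
--     for v in vals:
--         if run_val is not None and v == run_val:
--             run_len += 1
--         else:
--             run_val = v
--             run_len = 1
--         if run_len > best:
--             best = run_len
--             mode = v
--     key = int_to_bits(mode ^ ord(' '))
--     return (key, [b ^ key[i % len(key)] for i, b in enumerate(message)])
-- ===== Notes on version B (the rewrite author's own statement) =====
-- stated objective: alternative
-- what changed: B replaces A's 256-slot counting array plus full 0..255 argmax scan by sorting the list of block values and finding the smallest most-frequent value in one run-length scan over the sorted list, and replaces A's index-loop XOR helper by an enumerate comprehension.
import Mathlib
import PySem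

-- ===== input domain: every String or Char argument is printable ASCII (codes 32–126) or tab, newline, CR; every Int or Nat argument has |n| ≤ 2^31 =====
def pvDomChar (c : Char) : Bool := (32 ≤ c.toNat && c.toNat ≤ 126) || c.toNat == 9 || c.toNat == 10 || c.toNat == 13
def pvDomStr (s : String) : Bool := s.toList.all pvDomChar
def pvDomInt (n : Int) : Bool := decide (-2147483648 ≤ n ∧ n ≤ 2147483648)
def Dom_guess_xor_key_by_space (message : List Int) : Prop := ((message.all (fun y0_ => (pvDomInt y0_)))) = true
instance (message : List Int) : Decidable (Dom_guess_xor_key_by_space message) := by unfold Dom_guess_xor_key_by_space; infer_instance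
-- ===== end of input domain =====

-- B sorts the block values and takes the smallest most-frequent one in a single run-length scan,
-- instead of A's 256-slot counting array with a full 0..255 argmax pass; same result, similar cost.


-- ===== PORT A =====
-- helpers shared by both Pythons (Source B reuses A's int_to_bits / bits_to_int verbatim)

-- 'while n > 0: bits.append(1 if n % 2 else 0); n //= 2'  (bits collected LSB-first)
def int_to_bits_loop (n : Int) : List Int :=
  if 0 < n then
    (if PySem.Int.mod n 2 ≠ 0 then (1 : Int) else 0) :: int_to_bits_loop (PySem.Int.floordiv n 2)
  else []
termination_by n.toNat
decreasing_by
  rw [PySem.Int.floordiv_eq_ediv_of_pos (by omega)]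
  omega

-- 'while len(bits) < size: bits.append(0)'
def pad_bits (bits : List Int) (size : Int) : List Int :=
  if h : PySem.List.len bits < size then pad_bits (bits ++ [0]) size else bits
termination_by (size - bits.length).toNat
decreasing_by
  simp only [PySem.List.len_eq] at h
  simp only [List.length_append, List.length_singleton]
  omega

def int_to_bits (n : Int) (size : Int) : List Int :=
  (pad_bits (int_to_bits_loop n) size).reverse   -- bits[::-1]

def bits_to_int (bits : List Int) : Int :=
  bits.foldl (fun integer c => integer * 2 + c) 0

def apply_repeatedXor (bits key : List Int) : List Int :=
  (PySem.List.pyRange 0 (PySem.List.len bits) 1).map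
    (fun i => PySem.Int.bxor (PySem.List.pyGetD bits i 0)
      (PySem.List.pyGetD key (PySem.Int.mod i (PySem.List.len key)) 0))

def guess_xor_key_by_space (message : List Int) : List Int × List Int :=
  let counter0 : List Int := (PySem.List.pyRange 0 256 1).map (fun _ => 0)
  let counter : List Int :=
    (PySem.List.pyRange 0 (PySem.Int.floordiv (PySem.List.len message) 8) 1).foldl
      (fun c i =>
        PySem.List.pySetD c (bits_to_int (PySem.List.slice message (some (8 * i)) (some (8 * (i + 1)))))
          (PySem.List.pyGetD c (bits_to_int (PySem.List.slice message (some (8 * i)) (some (8 * (i + 1))))) 0 + 1))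
      counter0
  -- st = (appearances, moreCommonChar)
  let r : Int × Int :=
    (PySem.List.pyRange 0 256 1).foldl
      (fun st i => if st.1 < PySem.List.pyGetD counter i 0 then (PySem.List.pyGetD counter i 0, i) else st)
      (-1, -1)
  let key := int_to_bits (PySem.Int.bxor r.2 32) 8
  (key, apply_repeatedXor message key)

-- ===== PORT B =====
-- one step of Source B's run-length scan over the sorted block values; state (mode, best, run_val, run_len)
def run_scan_step (s : Int × Int × Option Int × Int) (v : Int) : Int × Int × Option Int × Int :=
  let rl : Int :=
    match s.2.2.1 with
    | some rv => if v = rv then s.2.2.2 + 1 else 1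
    | none => 1
  if rl > s.2.1 then (v, rl, some v, rl) else (s.1, s.2.1, some v, rl)

def guess_xor_key_by_space_alt (message : List Int) : List Int × List Int :=
  let vals : List Int :=
    PySem.List.sorted
      ((PySem.List.pyRange 0 (PySem.Int.floordiv (PySem.List.len message) 8) 1).map
        (fun i => bits_to_int (PySem.List.slice message (some (8 * i)) (some (8 * (i + 1))))))
      (fun v => v) false
  let st := vals.foldl run_scan_step (0, 0, none, 0)
  let key := int_to_bits (PySem.Int.bxor st.1 32) 8
  (key, (PySem.List.enumerate message 0).map
    (fun p => PySem.Int.bxor p.2 (PySem.List.pyGetD key (PySem.Int.mod p.1 (PySem.List.len key)) 0)))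

-- ===== PRECONDITION & SPEC =====
-- value of the i-th full 8-entry block of the message
def pvChunkVal (message : List Int) (i : Nat) : Int :=
  ((message.drop (8 * i)).take 8).foldl (fun acc c => acc * 2 + c) 0

-- Pre_ requires each full 8-entry block to encode a byte value in 0..255 (the natural domain: a
-- message of bits). Outside it A either raises IndexError (block value > 255 or < -256) or counts
-- the block through accidental negative-index wraparound of the counter array (block value in -256..-1).
def Pre_guess_xor_key_by_space (message : List Int) : Prop :=
  ∀ i : Nat, i < message.length / 8 → 0 ≤ pvChunkVal message i ∧ pvChunkVal message i < 256
instance (message : List Int) : Decidable (Pre_guess_xor_key_by_space message) := by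
  unfold Pre_guess_xor_key_by_space; infer_instance

def pvWitness_guess_xor_key_by_space : List Int :=
  [0, 1, 0, 0, 0, 0, 0, 1, 0, 1, 0, 0, 0, 0, 0, 1, 1, 0]

def Spec_guess_xor_key_by_space (message : List Int) (out : List Int × List Int) : Prop := out = guess_xor_key_by_space_alt message
instance (message : List Int) (out : List Int × List Int) : Decidable (Spec_guess_xor_key_by_space message out) := by unfold Spec_guess_xor_key_by_space; infer_instance

-- ===== CLAIM (what is proved, stated in full; the proofs are below) =====
def Claim_equal_guess_xor_key_by_space : Prop := ∀ (message : List Int), Dom_guess_xor_key_by_space message → Pre_guess_xor_key_by_space message → Spec_guess_xor_key_by_space message (guess_xor_key_by_space message)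

-- ===== LEMMAS AND PROOFS =====

-- b is the maximal multiplicity in l, and m is the smallest value attaining it
def IsMode (l : List Int) (b m : Int) : Prop :=
  (∀ v : Int, (l.count v : Int) ≤ b) ∧ ((l.count m : Int) = b) ∧
  (∀ v : Int, (l.count v : Int) = b → m ≤ v)

lemma isMode_unique {l : List Int} {b1 m1 b2 m2 : Int}
    (h1 : IsMode l b1 m1) (h2 : IsMode l b2 m2) : b1 = b2 ∧ m1 = m2 := by
  obtain ⟨hle1, hc1, hmin1⟩ := h1
  obtain ⟨hle2, hc2, hmin2⟩ := h2
  have hb : b1 = b2 := le_antisymm (hc1 ▸ hle2 m1) (hc2 ▸ hle1 m2)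
  subst hb
  exact ⟨rfl, le_antisymm (hmin1 m2 hc2) (hmin2 m1 hc1)⟩

lemma isMode_of_perm {l l' : List Int} {b m : Int} (hp : l.Perm l') (h : IsMode l b m) :
    IsMode l' b m := by
  obtain ⟨hle, hc, hmin⟩ := h
  refine ⟨fun v => ?_, ?_, fun v hv => ?_⟩
  · rw [← hp.count_eq]; exact hle v
  · rw [← hp.count_eq]; exact hc
  · exact hmin v (by rw [hp.count_eq]; exact hv)

lemma count_append_singleton_self (p : List Int) (v : Int) :
    (p ++ [v]).count v = p.count v + 1 := by
  simp [List.count_append]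

lemma count_append_singleton_ne (p : List Int) (v u : Int) (hu : u ≠ v) :
    (p ++ [v]).count u = p.count u := by
  simp [List.count_append, List.count_singleton]
  omega

-- invariant of Source B's run-length scan after processing a sorted prefix p
def ScanInv (p : List Int) (st : Int × Int × Option Int × Int) : Prop :=
  (p = [] ∧ st = (0, 0, none, 0)) ∨
  (∃ w, st.2.2.1 = some w ∧ w ∈ p ∧ (∀ x ∈ p, x ≤ w) ∧
    st.2.2.2 = (p.count w : Int) ∧ IsMode p st.2.1 st.1)

lemma scan_inv (p : List Int) (hs : p.Pairwise (· ≤ ·)) :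
    ScanInv p (p.foldl run_scan_step (0, 0, none, 0)) := by
  induction p using List.reverseRecOn with
  | nil => exact Or.inl ⟨rfl, rfl⟩
  | append_singleton p v ih =>
    have hp : p.Pairwise (· ≤ ·) := (List.pairwise_append.mp hs).1
    have hle : ∀ x ∈ p, x ≤ v := fun x hx =>
      (List.pairwise_append.mp hs).2.2 x hx v (by simp)
    rw [List.foldl_append, List.foldl_cons, List.foldl_nil]
    rcases ih hp with ⟨hpe, hst⟩ | ⟨w, hw, hwmem, hwmax, hcnt, hmode⟩
    · subst hpe; rw [hst]
      have hstep : run_scan_step (0, 0, none, 0) v = (v, 1, some v, 1) := by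
        simp [run_scan_step]
      rw [hstep]
      refine Or.inr ⟨v, rfl, by simp, by simp, by simp, ?_, by simp, ?_⟩
      · intro u
        by_cases hu : u = v
        · subst hu; rw [count_append_singleton_self]; simp
        · rw [count_append_singleton_ne _ _ _ hu]; simp
      · intro u hu
        by_cases h : u = v
        · omega
        · rw [count_append_singleton_ne _ _ _ h] at hu
          simp at hu
    · obtain ⟨hbmax, hbcount, hbmin⟩ := hmode
      set st := p.foldl run_scan_step (0, 0, none, 0) with hstdef
      have hw1 : (1 : Int) ≤ (p.count w : Int) := by
        have := List.count_pos_iff.mpr hwmem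
        omega
      have hbest1 : (1 : Int) ≤ st.2.1 := le_trans hw1 (hbmax w)
      have hmodemem : st.1 ∈ p := by
        have : 0 < p.count st.1 := by omega
        exact List.count_pos_iff.mp this
      have hmodele : st.1 ≤ v := hle _ hmodemem
      by_cases hvw : v = w
      · subst hvw
        have hstep : run_scan_step st v =
            if ((p.count v : Int) + 1) > st.2.1
            then (v, (p.count v : Int) + 1, some v, (p.count v : Int) + 1)
            else (st.1, st.2.1, some v, (p.count v : Int) + 1) := by
          simp [run_scan_step, hw, hcnt]
        rw [hstep]
        by_cases hgt : ((p.count v : Int) + 1) > st.2.1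
        · rw [if_pos hgt]
          refine Or.inr ⟨v, rfl, by simp, ?_, ?_, ?_, ?_, ?_⟩
          · intro x hx
            rcases List.mem_append.mp hx with h | h
            · exact hle x h
            · simp at h; omega
          · rw [count_append_singleton_self]; push_cast; ring
          · intro u
            dsimp only
            by_cases hu : u = v
            · subst hu; rw [count_append_singleton_self]; push_cast; omega
            · rw [count_append_singleton_ne _ _ _ hu]
              have := hbmax u
              omega
          · rw [count_append_singleton_self]; push_cast; ring
          · intro u hu
            dsimp only at hu ⊢
            by_cases h : u = v
            · omega
            · rw [count_append_singleton_ne _ _ _ h] at hu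
              have := hbmax u
              omega
        · rw [if_neg hgt]
          have hmodene : st.1 ≠ v := by
            intro h
            have := hbcount
            rw [h] at this
            omega
          refine Or.inr ⟨v, rfl, by simp, ?_, ?_, ?_, ?_, ?_⟩
          · intro x hx
            rcases List.mem_append.mp hx with h | h
            · exact hle x h
            · simp at h; omega
          · rw [count_append_singleton_self]; push_cast; ring
          · intro u
            dsimp only
            by_cases hu : u = v
            · subst hu; rw [count_append_singleton_self]; push_cast; omega
            · rw [count_append_singleton_ne _ _ _ hu]; exact hbmax u
          · rw [count_append_singleton_ne _ _ _ hmodene]; exact hbcount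
          · intro u hu
            dsimp only at hu ⊢
            by_cases h : u = v
            · subst h; rw [count_append_singleton_self] at hu; push_cast at hu; omega
            · rw [count_append_singleton_ne _ _ _ h] at hu
              exact hbmin u hu
      · have hwv : w ≤ v := hle w hwmem
        have hvnot : v ∉ p := by
          intro hvp
          exact hvw (le_antisymm (hwmax v hvp) hwv ▸ rfl)
        have hcountv0 : p.count v = 0 := List.count_eq_zero.mpr hvnot
        have hstep : run_scan_step st v = (st.1, st.2.1, some v, 1) := by
          simp only [run_scan_step, hw, if_neg hvw]
          rw [if_neg (by omega : ¬ ((1:Int) > st.2.1))]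
        rw [hstep]
        refine Or.inr ⟨v, rfl, by simp, ?_, ?_, ?_, ?_, ?_⟩
        · intro x hx
          rcases List.mem_append.mp hx with h | h
          · exact hle x h
          · simp at h; omega
        · rw [count_append_singleton_self, hcountv0]
          dsimp only
          norm_num
        · intro u
          dsimp only
          by_cases hu : u = v
          · subst hu; rw [count_append_singleton_self, hcountv0]; push_cast; omega
          · rw [count_append_singleton_ne _ _ _ hu]; exact hbmax u
        · have hne : st.1 ≠ v := fun h => hvnot (h ▸ hmodemem)
          rw [count_append_singleton_ne _ _ _ hne]; exact hbcount
        · intro u hu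
          dsimp only at hu ⊢
          by_cases h : u = v
          · subst h; omega
          · rw [count_append_singleton_ne _ _ _ h] at hu
            exact hbmin u hu

-- the fold of A's argmax loop over range N picks the first index attaining the running maximum
lemma argmax_fold (cnt : Int → Int) (h0 : 0 ≤ cnt 0) (N : Nat) (hN : 0 < N) :
    ∃ j : Nat, j < N ∧
      (PySem.List.pyRange 0 (↑N) 1).foldl
        (fun st i => if st.1 < cnt i then (cnt i, i) else st) ((-1 : Int), (-1 : Int))
        = (cnt ↑j, ↑j) ∧
      (∀ i : Nat, i < N → cnt ↑i ≤ cnt ↑j) ∧ (∀ i : Nat, i < j → cnt ↑i < cnt ↑j) := by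
  induction N with
  | zero => omega
  | succ N ih =>
    have hrw : PySem.List.pyRange 0 (↑(N+1)) 1 = PySem.List.pyRange 0 (↑N) 1 ++ [(↑N : Int)] := by
      push_cast
      exact PySem.List.pyRange_one_succ_right (by positivity)
    rcases Nat.eq_zero_or_pos N with hz | hpos
    · subst hz
      refine ⟨0, by omega, ?_, ?_, ?_⟩
      · rw [hrw]
        simp [PySem.List.pyRange_one_eq_nil, if_pos (by omega : (-1:Int) < cnt 0)]
      · intro i hi; interval_cases i; exact le_refl _
      · intro i hi; omega
    · obtain ⟨j, hj, heq, hmax, hstrict⟩ := ih hpos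
      rw [hrw, List.foldl_append, heq]
      simp only [List.foldl_cons, List.foldl_nil]
      by_cases hlt : cnt ↑j < cnt ↑N
      · refine ⟨N, by omega, by rw [if_pos hlt], ?_, ?_⟩
        · intro i hi
          rcases Nat.lt_succ_iff_lt_or_eq.mp hi with h | h
          · exact le_of_lt (lt_of_le_of_lt (hmax i h) hlt)
          · subst h; exact le_refl _
        · intro i hi; exact lt_of_le_of_lt (hmax i (by omega)) hlt
      · refine ⟨j, by omega, by rw [if_neg hlt], ?_, hstrict⟩
        intro i hi
        rcases Nat.lt_succ_iff_lt_or_eq.mp hi with h | h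
        · exact hmax i h
        · subst h; omega

-- counter array: entry j of the built counter is the multiplicity of j among the processed values
lemma counter_fold_inv (l : List Int) (hl : ∀ v ∈ l, 0 ≤ v ∧ v < 256) :
    ∀ (c : List Int) (f : Nat → Int), c.length = 256 →
      (∀ j : Nat, j < 256 → PySem.List.pyGetD c ↑j 0 = f j) →
      (l.foldl (fun c v => PySem.List.pySetD c v (PySem.List.pyGetD c v 0 + 1)) c).length = 256 ∧
      (∀ j : Nat, j < 256 →
        PySem.List.pyGetD (l.foldl (fun c v => PySem.List.pySetD c v (PySem.List.pyGetD c v 0 + 1)) c) ↑j 0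
          = f j + (l.count ↑j : Int)) := by
  induction l with
  | nil =>
    intro c f hlen hf
    refine ⟨hlen, fun j hj => ?_⟩
    simpa using hf j hj
  | cons v t ih =>
    intro c f hlen hf
    have hv := hl v (by simp)
    have hvn : v = ((v.toNat : Nat) : Int) := by omega
    have hvlt : v.toNat < c.length := by omega
    have hstep : PySem.List.pySetD c v (PySem.List.pyGetD c v 0 + 1)
        = PySem.List.pySetD c (↑v.toNat) (PySem.List.pyGetD c (↑v.toNat) 0 + 1) := by rw [← hvn]
    have hlen' : (PySem.List.pySetD c v (PySem.List.pyGetD c v 0 + 1)).length = 256 := by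
      rw [hstep, PySem.List.pySetD_natCast, List.length_set, hlen]
    have ht : ∀ x ∈ t, 0 ≤ x ∧ x < 256 := fun x hx => hl x (by simp [hx])
    have hf' : ∀ j : Nat, j < 256 →
        PySem.List.pyGetD (PySem.List.pySetD c v (PySem.List.pyGetD c v 0 + 1)) ↑j 0
          = (fun j => if j = v.toNat then f j + 1 else f j) j := by
      intro j hj
      rw [hstep, PySem.List.pyGetD_pySetD_natCast c v.toNat j _ 0 hvlt]
      simp only [hf j hj, hf v.toNat (by omega)]
      split_ifs with h
      · subst h; rfl
      · rfl
    obtain ⟨hL, hG⟩ := ih ht _ _ hlen' hf'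
    simp only [List.foldl_cons]
    refine ⟨hL, fun j hj => ?_⟩
    rw [hG j hj]
    simp only [List.count_cons]
    by_cases h : j = v.toNat
    · subst h
      have hbeq : (v == ((v.toNat : Nat) : Int)) = true := by simp [← hvn]
      rw [if_pos rfl, hbeq]
      simp only [if_true]
      push_cast; ring
    · have hne : ¬ (v = ((j : Nat) : Int)) := by omega
      rw [if_neg h]
      simp [hne]

-- each full block of the message, as read by the ports, is pvChunkVal
lemma chunk_eq_pvChunkVal (message : List Int) (k : Nat) :
    bits_to_int (PySem.List.slice message (some (8 * (k:Int))) (some (8 * ((k:Int) + 1)))) = pvChunkVal message k := by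
  have h1 : (8 * (k:Int)) = ((8*k : Nat) : Int) := by push_cast; ring
  have h2 : (8 * ((k:Int) + 1)) = ((8*k+8 : Nat) : Int) := by push_cast; ring
  rw [h1, h2, PySem.List.slice_natCast]
  have h3 : 8*k+8 - 8*k = 8 := by omega
  rw [h3]
  rfl

lemma pyRange_map_bridge (message : List Int) (f : Int → Int) :
    (PySem.List.pyRange 0 (PySem.Int.floordiv (PySem.List.len message) 8) 1).map f
      = (List.range (message.length / 8)).map (fun k : Nat => f (k : Int)) := by
  have h : PySem.Int.floordiv (PySem.List.len message) 8 = ((message.length / 8 : Nat) : Int) := by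
    rw [PySem.List.len_eq]
    exact_mod_cast PySem.Int.floordiv_natCast message.length 8
  rw [h, PySem.List.pyRange_zero_nat, List.map_map]
  rfl

-- the ciphertext computed by A's index loop equals B's enumerate comprehension
lemma cipher_bridge (message key : List Int) :
    apply_repeatedXor message key
      = (PySem.List.enumerate message 0).map
          (fun p => PySem.Int.bxor p.2 (PySem.List.pyGetD key (PySem.Int.mod p.1 (PySem.List.len key)) 0)) := by
  rw [PySem.List.enumerate_eq_map_pyRange (d := 0), List.map_map]
  rfl

-- ===== VERDICT (by name: the statement is the Claim_ definition above) =====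
theorem guess_xor_key_by_space_spec : Claim_equal_guess_xor_key_by_space := by
  intro message hDom hPre
  unfold Spec_guess_xor_key_by_space
  simp only [guess_xor_key_by_space, guess_xor_key_by_space_alt]
  set n := message.length / 8 with hn
  -- the list of block values
  set chunksN : List Int := (List.range n).map
      (fun k : Nat => bits_to_int (PySem.List.slice message (some (8 * (k:Int))) (some (8 * ((k:Int) + 1))))) with hchunksN
  have hmapeq : (PySem.List.pyRange 0 (PySem.Int.floordiv (PySem.List.len message) 8) 1).map
      (fun i => bits_to_int (PySem.List.slice message (some (8 * i)) (some (8 * (i + 1)))))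
      = chunksN := pyRange_map_bridge message _
  -- block values lie in 0..255
  have hbounds : ∀ v ∈ chunksN, 0 ≤ v ∧ v < 256 := by
    intro v hv
    rw [hchunksN] at hv
    obtain ⟨k, hk, rfl⟩ := List.mem_map.mp hv
    rw [chunk_eq_pvChunkVal]
    exact hPre k (List.mem_range.mp hk)
  -- A's counter fold is the fold over the block values
  have hcf : (PySem.List.pyRange 0 (PySem.Int.floordiv (PySem.List.len message) 8) 1).foldl
      (fun c i =>
        PySem.List.pySetD c (bits_to_int (PySem.List.slice message (some (8 * i)) (some (8 * (i + 1)))))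
          (PySem.List.pyGetD c (bits_to_int (PySem.List.slice message (some (8 * i)) (some (8 * (i + 1))))) 0 + 1))
      ((PySem.List.pyRange 0 256 1).map (fun _ => (0:Int)))
      = chunksN.foldl (fun c v => PySem.List.pySetD c v (PySem.List.pyGetD c v 0 + 1))
          ((PySem.List.pyRange 0 256 1).map (fun _ => (0:Int))) := by
    rw [← hmapeq]
    exact (List.foldl_map
      (f := fun i => bits_to_int (PySem.List.slice message (some (8 * i)) (some (8 * (i + 1)))))
      (g := fun c v => PySem.List.pySetD c v (PySem.List.pyGetD c v 0 + 1))).symm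
  rw [hcf, hmapeq]
  set C : List Int := chunksN.foldl (fun c v => PySem.List.pySetD c v (PySem.List.pyGetD c v 0 + 1))
      ((PySem.List.pyRange 0 256 1).map (fun _ => (0:Int))) with hC
  -- counter entries are multiplicities
  have hc0len : ((PySem.List.pyRange 0 256 1).map (fun _ => (0:Int))).length = 256 := by
    rw [List.length_map, PySem.List.length_pyRange_one]
    rfl
  have hc0get : ∀ j : Nat, j < 256 →
      PySem.List.pyGetD ((PySem.List.pyRange 0 256 1).map (fun _ => (0:Int))) ↑j 0 = (fun _ : Nat => (0:Int)) j := by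
    intro j hj
    have h256 : (256 : Int) = ((256 : Nat) : Int) := by norm_num
    rw [h256, PySem.List.pyGetD_map_pyRange (fun _ => (0:Int)) 256 j 0 hj]
  obtain ⟨hClen, hCget⟩ := counter_fold_inv chunksN hbounds _ _ hc0len hc0get
  have hCcount : ∀ j : Nat, j < 256 → PySem.List.pyGetD C ↑j 0 = (chunksN.count ↑j : Int) := by
    intro j hj
    rw [hC, hCget j hj]
    exact zero_add _
  -- A's argmax fold
  have h0 : (0:Int) ≤ (fun i => PySem.List.pyGetD C i 0) 0 := by
    have := hCcount 0 (by omega)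
    simp only [Nat.cast_zero] at this
    simp only [this]
    positivity
  obtain ⟨j, hj, hfold, hmax, hstrict⟩ := argmax_fold (fun i => PySem.List.pyGetD C i 0) h0 256 (by omega)
  have hfold' : (PySem.List.pyRange 0 256 1).foldl
      (fun st i => if st.1 < PySem.List.pyGetD C i 0 then (PySem.List.pyGetD C i 0, i) else st)
      ((-1 : Int), (-1 : Int)) = (PySem.List.pyGetD C ↑j 0, ↑j) := hfold
  rw [hfold']
  -- B's scan
  have hsorted : (PySem.List.sorted chunksN (fun v => v) false).Pairwise (· ≤ ·) := by
    simpa using PySem.List.sorted_pairwise chunksN (fun v => v)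
  have hscan := scan_inv _ hsorted
  -- the two modes agree
  have hmode : (↑j : Int) = ((PySem.List.sorted chunksN (fun v => v) false).foldl run_scan_step (0, 0, none, 0)).1 := by
    rcases Nat.eq_zero_or_pos n with hz | hpos
    · -- no full block: both modes are 0
      have hnil : chunksN = [] := by rw [hchunksN, hz]; rfl
      have hecnt : ∀ i : Nat, i < 256 → PySem.List.pyGetD C ↑i 0 = 0 := by
        intro i hi
        rw [hCcount i hi, hnil]
        simp
      have hj0 : j = 0 := by
        by_contra hne
        have h1 := hstrict 0 (by omega)
        rw [hecnt 0 (by omega), hecnt j hj] at h1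
        omega
      have hsn : PySem.List.sorted chunksN (fun v => v) false = [] := by
        rw [hnil]
        exact (PySem.List.sorted_eq_nil_iff _ _ _).mpr rfl
      rw [hsn, hj0]
      simp
    · -- at least one block: both sides compute the unique smallest most-frequent value
      have hne : chunksN ≠ [] := by
        rw [hchunksN]
        simp [List.map_eq_nil_iff, List.range_eq_nil]
        omega
      have hsne : PySem.List.sorted chunksN (fun v => v) false ≠ [] := by
        intro h
        exact hne ((PySem.List.sorted_eq_nil_iff _ _ _).mp h)
      rcases hscan with ⟨he, _⟩ | ⟨w, hw, hwmem, hwmax, hcnt, hmodeB⟩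
      · exact absurd he hsne
      · have hperm : (PySem.List.sorted chunksN (fun v => v) false).Perm chunksN :=
          PySem.List.sorted_perm _ _ _
        have hmodeB' := isMode_of_perm hperm hmodeB
        -- A's fold result is also a mode
        obtain ⟨v0, hv0⟩ := List.exists_mem_of_ne_nil chunksN hne
        have hv0b := hbounds v0 hv0
        have hv0cast : v0 = ((v0.toNat : Nat) : Int) := by omega
        have h1count : 1 ≤ chunksN.count v0 := List.count_pos_iff.mpr hv0
        have hub : ∀ v : Int, (chunksN.count v : Int) ≤ PySem.List.pyGetD C ↑j 0 := by
          intro v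
          by_cases hvmem : v ∈ chunksN
          · have hvb := hbounds v hvmem
            have hvc : v = ((v.toNat : Nat) : Int) := by omega
            have hlt : v.toNat < 256 := by omega
            have := hmax v.toNat hlt
            rw [hCcount v.toNat hlt] at this
            rw [hvc]
            exact this
          · rw [List.count_eq_zero.mpr hvmem]
            rw [hCcount j hj]
            positivity
        have hjpos : 1 ≤ PySem.List.pyGetD C ↑j 0 := by
          have := hub v0
          have hc : (1:Int) ≤ (chunksN.count v0 : Int) := by exact_mod_cast h1count
          omega
        have hAmode : IsMode chunksN (PySem.List.pyGetD C ↑j 0) ↑j := by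
          refine ⟨hub, hCcount j hj ▸ rfl, ?_⟩
          · intro v hv
            have hvmem : v ∈ chunksN := by
              by_contra habs
              rw [List.count_eq_zero.mpr habs] at hv
              omega
            have hvb := hbounds v hvmem
            have hvc : v = ((v.toNat : Nat) : Int) := by omega
            have hlt : v.toNat < 256 := by omega
            by_contra hlt2
            push Not at hlt2
            have hjgt : v.toNat < j := by omega
            have := hstrict v.toNat hjgt
            rw [hCcount v.toNat hlt] at this
            rw [hvc] at hv
            omega
        exact (isMode_unique hAmode hmodeB').2
  rw [hmode, cipher_bridge]
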